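-- pv_equiv track=rewrite | github.com/AdamZhouSE/pythonHomework | Code/CodeRecords/2953/60643/273277.py | solution
-- ===== SOURCE A (Python) =====
-- def  solution(a,b,minCnt):#不用减法用辗转相除法会出现余数为零送进递归的情况 还是用减法比较好
--     cnt=0
--     while a>1:#保证较小数一直在前面
--         c=b%a
--         cnt+=b//a
--         b=a
--         a=c#swap
--     if a==1:
--         minCnt=min(minCnt,cnt+b-1)
--     return minCnt
-- ===== SOURCE B (Python) =====
-- def solution(a, b, minCnt):
--     # Partial cost function: cost(a, b) is the total cost (quotient sum plus
--     # final b minus 1) when the Euclidean descent from (a, b) ends at a == 1,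
--     # and None (no cost) when it ends at a <= 0 instead.
--     def cost(a, b):
--         if a == 1:
--             return b - 1
--         if a < 1:
--             return None
--         sub = cost(b % a, a)
--         return None if sub is None else sub + b // a
--     c = cost(a, b)
--     return minCnt if c is None else min(minCnt, c)
-- ===== Notes on version B (the rewrite author's own statement) =====
-- stated objective: alternative
-- what changed: Replaces A's while-loop over mutable (a,b,cnt) state plus a post-loop a==1 check by a partial Option-valued recursion cost(a,b) whose base cases decide success (a==1 gives b-1) or failure (a<1 gives None) directly, with the min applied once at the top.
import Mathlib
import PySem

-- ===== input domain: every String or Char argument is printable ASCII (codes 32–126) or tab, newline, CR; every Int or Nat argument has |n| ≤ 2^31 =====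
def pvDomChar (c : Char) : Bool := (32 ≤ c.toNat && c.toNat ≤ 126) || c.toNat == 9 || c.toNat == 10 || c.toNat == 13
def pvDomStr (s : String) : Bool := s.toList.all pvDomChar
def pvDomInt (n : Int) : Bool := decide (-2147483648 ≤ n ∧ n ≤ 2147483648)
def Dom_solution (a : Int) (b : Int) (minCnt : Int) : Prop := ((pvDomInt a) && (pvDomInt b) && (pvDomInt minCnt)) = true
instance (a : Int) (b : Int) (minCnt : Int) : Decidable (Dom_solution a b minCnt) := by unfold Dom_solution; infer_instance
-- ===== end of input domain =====

-- B trades A's while-loop with mutable (a,b,cnt) state and post-loop check for a partial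
-- Option-valued cost recursion with success/failure base cases (objective: alternative structure).

-- ===== PORT A =====
-- A's while-loop: state (a, b, cnt); each step: c = b % a, cnt += b // a, b = a, a = c.
def solutionLoop (a b cnt : Int) : Int × Int × Int :=
  if h : a > 1 then
    solutionLoop (PySem.Int.mod b a) a (cnt + PySem.Int.floordiv b a)
  else (a, b, cnt)
termination_by a.toNat
decreasing_by
  have h1 : 0 ≤ PySem.Int.mod b a := PySem.Int.mod_nonneg b (by omega)
  have h2 : PySem.Int.mod b a < a := PySem.Int.mod_lt b (by omega)
  omega

def solution (a : Int) (b : Int) (minCnt : Int) : Int :=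
  let r := solutionLoop a b 0
  if r.1 = 1 then min minCnt (r.2.2 + r.2.1 - 1) else minCnt

-- ===== PORT B =====
-- B's partial cost function: some total cost when the descent ends at a == 1, none otherwise.
def solutionCost (a b : Int) : Option Int :=
  if a = 1 then some (b - 1)
  else if h : a < 1 then none
  else
    match solutionCost (PySem.Int.mod b a) a with
    | none => none
    | some sub => some (sub + PySem.Int.floordiv b a)
termination_by a.toNat
decreasing_by
  have h1 : 0 ≤ PySem.Int.mod b a := PySem.Int.mod_nonneg b (by omega)
  have h2 : PySem.Int.mod b a < a := PySem.Int.mod_lt b (by omega)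
  omega

def solution_alt (a : Int) (b : Int) (minCnt : Int) : Int :=
  match solutionCost a b with
  | none => minCnt
  | some c => min minCnt c

-- ===== PRECONDITION & SPEC =====
def Spec_solution (a : Int) (b : Int) (minCnt : Int) (out : Int) : Prop := out = solution_alt a b minCnt
instance (a : Int) (b : Int) (minCnt : Int) (out : Int) : Decidable (Spec_solution a b minCnt out) := by unfold Spec_solution; infer_instance

-- ===== CLAIM (what is proved, stated in full; the proofs are below) =====
def Claim_equal_solution : Prop := ∀ (a : Int) (b : Int) (minCnt : Int), Dom_solution a b minCnt → Spec_solution a b minCnt (solution a b minCnt)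

-- ===== LEMMAS AND PROOFS =====
-- B's partial cost equals the successful outcome of A's loop, for any accumulator value.
theorem solutionCost_eq_loop (a b cnt : Int) :
    solutionCost a b
      = (if (solutionLoop a b cnt).1 = 1
          then some ((solutionLoop a b cnt).2.2 + (solutionLoop a b cnt).2.1 - 1 - cnt)
          else none) := by
  by_cases h : a > 1
  · rw [solutionCost, solutionLoop]
    simp only [dif_pos h, if_neg (by omega : ¬ a = 1), dif_neg (by omega : ¬ a < 1)]
    rw [solutionCost_eq_loop (PySem.Int.mod b a) a (cnt + PySem.Int.floordiv b a)]
    split_ifs with h1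
    · simp only [Option.some.injEq]; omega
    · rfl
  · rw [solutionCost, solutionLoop]
    simp only [dif_neg h]
    by_cases ha : a = 1
    · simp [ha]; omega
    · simp [ha, dif_pos (by omega : a < 1)]
termination_by a.toNat
decreasing_by
  have h1 : 0 ≤ PySem.Int.mod b a := PySem.Int.mod_nonneg b (by omega)
  have h2 : PySem.Int.mod b a < a := PySem.Int.mod_lt b (by omega)
  omega

-- ===== VERDICT (by name: the statement is the Claim_ definition above) =====
theorem solution_spec : Claim_equal_solution := by
  intro a b minCnt _
  unfold Spec_solution solution solution_alt
  rw [solutionCost_eq_loop a b 0]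
  by_cases h1 : (solutionLoop a b 0).1 = 1
  · simp only [if_pos h1]
    omega
  · simp only [if_neg h1]
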